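-- pv_equiv track=rewrite | github.com/firstep710/Programmers | (level2)메뉴 리뉴얼.py | solution
-- ===== SOURCE A (Python) =====
-- from itertools import combinations
--
-- def solution(orders, course):
--     answer = []
--     menu=sorted(list(set(''.join(orders))))
--     orders=sorted(orders,key=lambda x:len(x), reverse=True)
--     a=[]
--     dic={}
--     stack=[]
--     for i in course:
--         if i>len(orders[0]):
--             break
--         a=set(combinations(menu,i))
--         b=[]
--         for j in a:
--             c=0
--             for k in orders:
--                 if set(j).intersection(k)==set(j):
--                     c+=1
--             if c>1:
--                 dic[j]=c
--                 b.append(c)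
--         if b!=[]:
--             stack.append(max(b))
--             q=stack.pop(0)
--         for p in dic:
--             if len(p)==i:
--                 if dic[p]==q:
--                     answer.append(''.join(list(p)))
--
--     return sorted(answer)
-- ===== SOURCE B (Python) =====
-- from itertools import combinations
-- from collections import Counter
--
-- def solution(orders, course):
--     maxlen = max((len(o) for o in orders), default=0)
--     sizes = []
--     for i in course:
--         if i > maxlen:
--             break
--         sizes.append(i)
--     counter = Counter()
--     for o in orders:
--         chars = sorted(set(o))
--         for i in set(sizes):
--             counter.update(combinations(chars, i))
--     answer = []
--     for i in sizes:
--         cands = [c for c in counter if len(c) == i and counter[c] >= 2]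
--         if cands:
--             best = max(counter[c] for c in cands)
--             answer.extend(''.join(c) for c in cands if counter[c] == best)
--     return sorted(answer)
-- ===== Notes on version B (the rewrite author's own statement) =====
-- stated objective: alternative
-- what changed: Instead of enumerating every size-i combination of the global menu alphabet and testing each against every order by set intersection, B builds one Counter of the combinations drawn from each order itself and reads the per-size candidates and maxima from it.
import Mathlib
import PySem

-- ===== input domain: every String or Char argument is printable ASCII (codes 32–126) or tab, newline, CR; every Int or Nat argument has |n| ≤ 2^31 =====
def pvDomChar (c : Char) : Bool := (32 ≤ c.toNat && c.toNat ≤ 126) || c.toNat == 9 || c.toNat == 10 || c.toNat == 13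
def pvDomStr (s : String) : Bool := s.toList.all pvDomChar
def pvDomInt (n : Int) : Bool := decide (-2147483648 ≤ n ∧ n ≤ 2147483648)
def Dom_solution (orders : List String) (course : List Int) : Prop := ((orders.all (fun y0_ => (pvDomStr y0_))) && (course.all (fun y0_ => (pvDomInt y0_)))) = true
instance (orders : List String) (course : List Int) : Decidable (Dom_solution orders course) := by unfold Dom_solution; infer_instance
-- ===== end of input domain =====

-- B replaces A's scan of ALL menu-combinations per course size (each tested against every
-- order by set intersection) with one Counter built from the combinations drawn from each
-- order itself — a different algorithm, same return value.

-- ===== PORT A =====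

def solA_cnt (sorders : List String) (j : List Char) : Int :=
  sorders.foldl (fun c k =>
    if PySem.Set.equal (PySem.Set.inter (PySem.Set.ofList j) k.toList) (PySem.Set.ofList j)
    then c + 1 else c) 0

def solA_loop (menu : List Char) (sorders : List String) :
    List Int → PySem.Dict (List Char) Int → List Int → Option Int → List String → List String
  | [], _, _, _, answer => answer
  | i :: rest, dic, stack, q?, answer =>
    if i > (PySem.Str.len (sorders.headD "") : Int) then answer
    else
      let a : PySem.Set (List Char) := PySem.Set.ofList (PySem.List.combinations menu i.toNat)
      let db := a.foldl (fun (st : PySem.Dict (List Char) Int × List Int) j =>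
          let c := solA_cnt sorders j
          if c > 1 then (st.1.insert j c, st.2 ++ [c]) else st) (dic, [])
      let b := db.2
      let qs : Option Int × List Int :=
        if b ≠ [] then
          match stack ++ [(PySem.List.max? b (fun x => x)).getD 0] with
          | v :: restS => (some v, restS)
          | [] => (q?, [])
        else (q?, stack)
      let answer := db.1.keys.foldl (fun ans p =>
          if (p.length : Int) = i then
            if some (db.1.getD p 0) == qs.1 then ans ++ [String.ofList p] else ans
          else ans) answer
      solA_loop menu sorders rest db.1 qs.2 qs.1 answer

def solution (orders : List String) (course : List Int) : List String :=
  let menu := PySem.List.sorted (PySem.Set.ofList (PySem.Str.join "" orders).toList) (fun x => x) false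
  let sorders := PySem.List.sorted orders (fun x => (PySem.Str.len x : Int)) true
  PySem.List.sorted (solA_loop menu sorders course PySem.Dict.empty [] none []) (fun x => x) false

-- ===== PORT B =====

def solB_sizes (maxlen : Int) : List Int → List Int
  | [] => []
  | i :: rest => if i > maxlen then [] else i :: solB_sizes maxlen rest

def solution_alt (orders : List String) (course : List Int) : List String :=
  let maxlen := PySem.List.maxD (orders.map (fun o => (PySem.Str.len o : Int))) (fun x => x) 0
  let sizes := solB_sizes maxlen course
  let counter := orders.foldl (fun d o =>
      let chars := PySem.List.sorted (PySem.Set.ofList o.toList) (fun x => x) false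
      (PySem.Set.ofList sizes).foldl (fun d i =>
        (PySem.List.combinations chars i.toNat).foldl (fun d c => d.modify c 0 (· + 1)) d) d)
    (PySem.Dict.empty : PySem.Dict (List Char) Int)
  let answer := sizes.foldl (fun ans i =>
      let cands := counter.keys.filter (fun c => (c.length : Int) == i && decide (2 ≤ counter.getD c 0))
      if cands ≠ [] then
        let best := (PySem.List.max? (cands.map (fun c => counter.getD c 0)) (fun x => x)).getD 0
        ans ++ (cands.filter (fun c => counter.getD c 0 == best)).map (fun c => String.ofList c)
      else ans) []
  PySem.List.sorted answer (fun x => x) false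

-- ===== PRECONDITION & SPEC =====
-- Pre_ excludes exactly the inputs where A raises: orders == [] with course != [] (IndexError
-- on orders[0]), and a negative course size reached before the break (ValueError in
-- combinations); on both kinds B would return (or also raise, for a reached negative size).

def Pre_solution (orders : List String) (course : List Int) : Prop :=
  (orders = [] → course = []) ∧
  ∀ i ∈ course.takeWhile
      (fun i => decide (i ≤ (orders.map (fun o => (PySem.Str.len o : Int))).foldl max 0)),
    0 ≤ i

instance (orders : List String) (course : List Int) : Decidable (Pre_solution orders course) := by
  unfold Pre_solution; infer_instance

def pvWitness_solution : List String × List Int := (["AB", "CAB", "B"], [2, 3])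

def Spec_solution (orders : List String) (course : List Int) (out : List String) : Prop :=
  out = solution_alt orders course
instance (orders : List String) (course : List Int) (out : List String) : Decidable (Spec_solution orders course out) := by
  unfold Spec_solution; infer_instance

-- ===== CLAIM (what is proved, stated in full; the proofs are below) =====
def Claim_equal_solution : Prop := ∀ (orders : List String) (course : List Int),
  Dom_solution orders course → Pre_solution orders course →
  Spec_solution orders course (solution orders course)

-- ===== LEMMAS AND PROOFS =====


lemma set_subset_test (j t : List Char) :
    PySem.Set.equal (PySem.Set.inter (PySem.Set.ofList j) t) (PySem.Set.ofList j)
      = j.all (fun x => t.contains x) := by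
  rw [Bool.eq_iff_iff]
  unfold PySem.Set.equal PySem.Set.inter PySem.Set.issubset PySem.Set.contains
  simp [List.all_eq_true, List.mem_filter, PySem.Set.mem_ofList]
  exact ⟨fun h x hx => (h.2 x hx).2,
         fun h => ⟨fun x hx => Or.inr hx, fun x hx => ⟨hx, h x hx⟩⟩⟩

lemma sublist_of_subset_pairwise_lt : ∀ (l2 l1 : List Char), l1.Pairwise (· < ·) → l2.Pairwise (· < ·) →
    (∀ x ∈ l1, x ∈ l2) → l1.Sublist l2 := by
  intro l2
  induction l2 with
  | nil =>
    intro l1 _ _ h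
    cases l1 with
    | nil => simp
    | cons x xs => exact absurd (h x (by simp)) (by simp)
  | cons y ys ih =>
    intro l1 h1 h2 h
    cases l1 with
    | nil => simp
    | cons x xs =>
      rcases List.mem_cons.1 (h x (by simp)) with hx | hx
      · subst hx
        apply List.Sublist.cons₂
        apply ih xs (h1.sublist (List.sublist_cons_self x xs)) (h2.sublist (List.sublist_cons_self x ys))
        intro z hz
        have hzy : x < z := (List.pairwise_cons.1 h1).1 z hz
        rcases List.mem_cons.1 (h z (by simp [hz])) with rfl | hzys
        · exact absurd hzy (lt_irrefl z)
        · exact hzys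
      · -- x ∈ ys, and y < x, so every element of x :: xs is in ys
        apply List.Sublist.cons
        apply ih (x :: xs) h1 (h2.sublist (List.sublist_cons_self y ys))
        intro z hz
        have hyx : y < z := by
          have hy : y < x := (List.pairwise_cons.1 h2).1 x hx
          rcases List.mem_cons.1 hz with rfl | hzxs
          · exact hy
          · exact lt_trans hy ((List.pairwise_cons.1 h1).1 z hzxs)
        rcases List.mem_cons.1 (h z hz) with rfl | hzys
        · exact absurd hyx (lt_irrefl z)
        · exact hzys

lemma nodup_combinations (xs : List Char) (r : Nat) (h : xs.Nodup) :
    (PySem.List.combinations xs r).Nodup := by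
  induction xs generalizing r with
  | nil => cases r <;> simp [PySem.List.combinations_zero, PySem.List.combinations_nil_succ]
  | cons x t ih =>
    cases r with
    | zero => simp [PySem.List.combinations_zero]
    | succ r =>
      rw [PySem.List.combinations_cons_succ]
      simp at h
      apply List.Nodup.append
      · exact List.Nodup.map (fun a b hab => by simpa using hab) (ih r h.2)
      · exact ih (r+1) h.2
      · intro c hc1 hc2
        simp at hc1
        obtain ⟨c', hc', rfl⟩ := hc1
        exact h.1 ((PySem.List.sublist_of_mem_combinations hc2).subset (by simp))

lemma mem_comb_sortedSet (xs : List Char) (r : Nat) (c : List Char) :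
    c ∈ PySem.List.combinations (PySem.List.sorted (PySem.Set.ofList xs) (fun x => x) false) r
      ↔ (c.Pairwise (· < ·) ∧ c.length = r ∧ ∀ y ∈ c, y ∈ xs) := by
  rw [PySem.List.mem_combinations_iff]
  constructor
  · rintro ⟨hs, hl⟩
    refine ⟨(PySem.List.sorted_ofList_pairwise_lt xs).sublist hs, hl, fun y hy => ?_⟩
    have := hs.subset hy
    rwa [PySem.List.mem_sorted, PySem.Set.mem_ofList] at this
  · rintro ⟨hp, hl, hm⟩
    refine ⟨sublist_of_subset_pairwise_lt _ _ hp (PySem.List.sorted_ofList_pairwise_lt xs) ?_, hl⟩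
    intro x hx
    rw [PySem.List.mem_sorted, PySem.Set.mem_ofList]
    exact hm x hx

lemma join_empty_flatten : ∀ (parts : List (List Char)), PySem.Chars.join [] parts = parts.flatten := by
  intro parts
  induction parts with
  | nil => simp [PySem.Chars.join_nil]
  | cons p rest ih =>
    cases rest with
    | nil => simp [PySem.Chars.join_singleton]
    | cons q r => rw [PySem.Chars.join_cons_cons]; simp at ih ⊢; exact ih

lemma mem_join_chars (orders : List String) (x : Char) :
    x ∈ (PySem.Str.join "" orders).toList ↔ ∃ o ∈ orders, x ∈ o.toList := by
  rw [PySem.Str.toList_join]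
  show x ∈ PySem.Chars.join ("".toList) _ ↔ _
  have : ("" : String).toList = [] := rfl
  rw [this, join_empty_flatten, List.mem_flatten]
  simp

lemma getD_foldl_inserts (g : List Char → Int) :
    ∀ (l : List (List Char)) (d : PySem.Dict (List Char) Int) (p : List Char),
    (l.foldl (fun d j => d.insert j (g j)) d).getD p 0 = if p ∈ l then g p else d.getD p 0 := by
  intro l
  induction l with
  | nil => simp
  | cons x t ih =>
    intro d p
    simp only [List.foldl_cons, ih, PySem.Dict.getD_insert]
    by_cases hpt : p ∈ t <;> by_cases hpx : p = x <;> simp [hpt, hpx]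

lemma stepA_pairfold' (cnt : List Char → Int) :
    ∀ (a : List (List Char)) (dic : PySem.Dict (List Char) Int) (acc : List Int),
    (a.foldl (fun (st : PySem.Dict (List Char) Int × List Int) j =>
        if cnt j > 1 then (st.1.insert j (cnt j), st.2 ++ [cnt j]) else st) (dic, acc))
      = ((a.filter (fun j => decide (1 < cnt j))).foldl (fun d j => d.insert j (cnt j)) dic,
         acc ++ (a.filter (fun j => decide (1 < cnt j))).map cnt) := by
  intro a
  induction a with
  | nil => simp
  | cons x t ih =>
    intro dic acc
    simp only [List.foldl_cons, List.filter_cons]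
    by_cases hx : 1 < cnt x
    · simp only [gt_iff_lt, hx, decide_true, if_true]
      rw [ih]; simp
    · simp only [gt_iff_lt, hx, decide_false, if_false]
      rw [ih]; simp

lemma maxD_getD_perm (l l' : List Int) (h : l.Perm l') :
    (PySem.List.max? l (fun x => x)).getD 0 = (PySem.List.max? l' (fun x => x)).getD 0 := by
  cases hl : PySem.List.max? l (fun x => x) with
  | none =>
    rw [PySem.List.max?_eq_none_iff] at hl
    subst hl
    have h2 : l' = [] := h.symm.eq_nil
    have h0 : PySem.List.max? ([] : List Int) (fun x => x) = none := (PySem.List.max?_eq_none_iff _ _).2 rfl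
    simp [h2, h0]
  | some m =>
    cases hl' : PySem.List.max? l' (fun x => x) with
    | none =>
      rw [PySem.List.max?_eq_none_iff] at hl'
      subst hl'
      exact absurd (h.eq_nil ▸ PySem.List.max?_mem hl) (by simp)
    | some m' =>
      have h1 := PySem.List.max?_isMax hl
      have h2 := PySem.List.max?_isMax hl'
      have hm : m ∈ l' := h.mem_iff.1 (PySem.List.max?_mem hl)
      have hm' : m' ∈ l := h.mem_iff.2 (PySem.List.max?_mem hl')
      simp only [Option.getD_some]
      exact le_antisymm (h2 m hm) (h1 m' hm')

-- per-order character list used by B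
def pvChars (o : String) : List Char :=
  PySem.List.sorted (PySem.Set.ofList o.toList) (fun x => x) false

lemma nodup_pvChars (o : String) : (pvChars o).Nodup :=
  ((PySem.List.sorted_perm (PySem.Set.ofList o.toList) (fun x => x) false).nodup_iff).2
    (PySem.Set.nodup_ofList _)

-- inner modify-fold: lookup adds the number of generations
lemma getD_innerfold (chars : List Char) (szs : List Int) :
    ∀ (d : PySem.Dict (List Char) Int) (c : List Char),
    ((szs.foldl (fun d i => (PySem.List.combinations chars i.toNat).foldl
        (fun d c => d.modify c 0 (· + 1)) d) d).getD c 0)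
      = d.getD c 0 + (szs.map (fun i => ((PySem.List.combinations chars i.toNat).count c : Int))).sum := by
  induction szs with
  | nil => simp
  | cons i t ih =>
    intro d c
    simp only [List.foldl_cons, ih, PySem.Dict.getD_foldl_modify_add_one, List.map_cons, List.sum_cons]
    ring

lemma contains_innerfold (chars : List Char) (szs : List Int) :
    ∀ (d : PySem.Dict (List Char) Int) (c : List Char),
    c ∈ ((szs.foldl (fun d i => (PySem.List.combinations chars i.toNat).foldl
        (fun d c => d.modify c 0 (· + 1)) d) d).keys)
      ↔ c ∈ d.keys ∨ ∃ i ∈ szs, c ∈ PySem.List.combinations chars i.toNat := by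
  induction szs with
  | nil => simp
  | cons i t ih =>
    intro d c
    simp only [List.foldl_cons, ih, PySem.Dict.keys_foldl_modify, PySem.Set.mem_update]
    constructor
    · rintro ((h | h) | ⟨i', hi', h⟩)
      · exact Or.inl h
      · exact Or.inr ⟨i, by simp, h⟩
      · exact Or.inr ⟨i', by simp [hi'], h⟩
    · rintro (h | ⟨i', hi', h⟩)
      · exact Or.inl (Or.inl h)
      · rcases List.mem_cons.1 hi' with rfl | hi''
        · exact Or.inl (Or.inr h)
        · exact Or.inr ⟨i', hi'', h⟩

lemma nodup_keys_innerfold (chars : List Char) (szs : List Int) (d : PySem.Dict (List Char) Int)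
    (h : d.keys.Nodup) :
    ((szs.foldl (fun d i => (PySem.List.combinations chars i.toNat).foldl
        (fun d c => d.modify c 0 (· + 1)) d) d).keys).Nodup := by
  induction szs generalizing d with
  | nil => exact h
  | cons i t ih =>
    simp only [List.foldl_cons]
    exact ih _ (by rw [PySem.Dict.keys_foldl_modify]; exact PySem.Set.nodup_update _ _ h)

def pvCounter (szs : List Int) (orders : List String) : PySem.Dict (List Char) Int :=
  orders.foldl (fun d o =>
      (szs.foldl (fun d i => (PySem.List.combinations (pvChars o) i.toNat).foldl
        (fun d c => d.modify c 0 (· + 1)) d) d)) PySem.Dict.empty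

lemma getD_pvCounter_sum (szs : List Int) (orders : List String) (c : List Char) :
    (pvCounter szs orders).getD c 0
      = (orders.map (fun o =>
          (szs.map (fun i => ((PySem.List.combinations (pvChars o) i.toNat).count c : Int))).sum)).sum := by
  unfold pvCounter
  rw [show orders.foldl _ PySem.Dict.empty =
    orders.foldl (fun (d : PySem.Dict (List Char) Int) o =>
      (szs.foldl (fun d i => (PySem.List.combinations (pvChars o) i.toNat).foldl
        (fun d c => d.modify c 0 (· + 1)) d) d)) PySem.Dict.empty from rfl]
  induction orders using List.reverseRecOn with
  | nil => simp
  | append_singleton t o ih =>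
    rw [List.foldl_append, List.map_append]
    simp only [List.foldl_cons, List.foldl_nil, List.sum_append, List.map_cons, List.sum_cons]
    rw [getD_innerfold, ih]
    simp

lemma mem_keys_pvCounter (szs : List Int) (orders : List String) (c : List Char) :
    c ∈ (pvCounter szs orders).keys
      ↔ ∃ o ∈ orders, ∃ i ∈ szs, c ∈ PySem.List.combinations (pvChars o) i.toNat := by
  unfold pvCounter
  induction orders using List.reverseRecOn with
  | nil => simp
  | append_singleton t o ih =>
    rw [List.foldl_append]
    simp only [List.foldl_cons, List.foldl_nil]
    rw [contains_innerfold, ih]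
    constructor
    · rintro (⟨o', ho', hi⟩ | hi)
      · exact ⟨o', by simp [ho'], hi⟩
      · exact ⟨o, by simp, hi⟩
    · rintro ⟨o', ho', hi⟩
      rcases List.mem_append.1 ho' with ho' | ho'
      · exact Or.inl ⟨o', ho', hi⟩
      · simp at ho'
        subst ho'
        exact Or.inr hi

lemma nodup_keys_pvCounter (szs : List Int) (orders : List String) :
    (pvCounter szs orders).keys.Nodup := by
  unfold pvCounter
  induction orders using List.reverseRecOn with
  | nil => simp
  | append_singleton t o ih =>
    rw [List.foldl_append]
    simp only [List.foldl_cons, List.foldl_nil]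
    exact nodup_keys_innerfold _ _ _ ih

def pvCnt (orders : List String) (j : List Char) : Nat :=
  orders.countP (fun k => j.all (fun x => k.toList.contains x))

lemma count_comb_nodup (chars : List Char) (h : chars.Nodup) (r : Nat) (c : List Char) :
    ((PySem.List.combinations chars r).count c : Int)
      = if c ∈ PySem.List.combinations chars r then 1 else 0 := by
  by_cases hm : c ∈ PySem.List.combinations chars r
  · rw [List.count_eq_one_of_mem (nodup_combinations chars r h) hm, if_pos hm]; rfl
  · rw [List.count_eq_zero_of_not_mem hm, if_neg hm]; rfl

lemma sum_indicator (o : String) (c : List Char) (szs : List Int)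
    (hn : szs.Nodup) (hnn : ∀ i ∈ szs, 0 ≤ i) :
    (szs.map (fun i => ((PySem.List.combinations (pvChars o) i.toNat).count c : Int))).sum
      = if ((c.length : Int) ∈ szs ∧ c ∈ PySem.List.combinations (pvChars o) c.length)
        then 1 else 0 := by
  induction szs with
  | nil => simp
  | cons i t ih =>
    have hnt : t.Nodup := hn.of_cons
    have hit : i ∉ t := (List.nodup_cons.1 hn).1
    have hnnt : ∀ j ∈ t, 0 ≤ j := fun j hj => hnn j (by simp [hj])
    by_cases hi : i = (c.length : Int)
    · subst hi
      have htn : ((c.length : Int)).toNat = c.length := by omega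
      rw [List.map_cons, List.sum_cons, htn, count_comb_nodup _ (nodup_pvChars o)]
      have ht0 : (t.map (fun j => ((PySem.List.combinations (pvChars o) j.toNat).count c : Int))).sum = 0 := by
        apply List.sum_eq_zero
        intro x hx
        simp only [List.mem_map] at hx
        obtain ⟨j, hj, rfl⟩ := hx
        have hj0 : 0 ≤ j := hnnt j hj
        have hjne : j.toNat ≠ c.length := by
          intro hEq
          apply hit
          have : j = (c.length : Int) := by omega
          rwa [← this]
        rw [List.count_eq_zero_of_not_mem]
        · rfl
        · intro hmem
          exact hjne (PySem.List.length_of_mem_combinations hmem).symm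
      rw [ht0]
      by_cases hm : c ∈ PySem.List.combinations (pvChars o) c.length <;>
        simp [hm, List.mem_cons]
    · have hhead : ((PySem.List.combinations (pvChars o) i.toNat).count c : Int) = 0 := by
        rw [List.count_eq_zero_of_not_mem]
        · rfl
        · intro hmem
          have hlen := PySem.List.length_of_mem_combinations hmem
          have h0 : 0 ≤ i := hnn i (by simp)
          omega
      rw [List.map_cons, List.sum_cons, hhead, zero_add, ih hnt hnnt]
      have hmemiff : ((c.length : Int) ∈ i :: t) ↔ ((c.length : Int) ∈ t) := by
        rw [List.mem_cons]
        constructor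
        · rintro (h | h)
          · exact absurd h.symm hi
          · exact h
        · exact Or.inr
      by_cases hm : ((c.length : Int) ∈ t ∧ c ∈ PySem.List.combinations (pvChars o) c.length) <;>
        simp_all

-- A's inner counting loop equals pvCnt (up to the reordering of orders)
lemma solA_cnt_fold (sorders : List String) (j : List Char) :
    (sorders.foldl (fun c k =>
      if PySem.Set.equal (PySem.Set.inter (PySem.Set.ofList j) k.toList) (PySem.Set.ofList j)
      then c + 1 else c) 0)
      = (sorders.countP (fun k => j.all (fun x => k.toList.contains x)) : Int) := by
  simp only [set_subset_test]
  rw [PySem.List.foldl_if_add_one]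
  simp

lemma all_contains_iff (j : List Char) (t : List Char) :
    (j.all (fun x => t.contains x)) = true ↔ ∀ x ∈ j, x ∈ t := by
  simp

def pvF (orders : List String) (r : Nat) : List (List Char) :=
  (PySem.Set.ofList (PySem.List.combinations (pvChars (PySem.Str.join "" orders)) r)).filter
    (fun j => decide (1 < (pvCnt orders j : Int)))

lemma nodup_pvF (orders : List String) (r : Nat) : (pvF orders r).Nodup :=
  (PySem.Set.nodup_ofList _).filter _

lemma mem_pvF (orders : List String) (r : Nat) (j : List Char) :
    j ∈ pvF orders r
      ↔ j ∈ PySem.List.combinations (pvChars (PySem.Str.join "" orders)) r ∧ 2 ≤ pvCnt orders j := by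
  unfold pvF
  rw [List.mem_filter, PySem.Set.mem_ofList]
  constructor
  · rintro ⟨h1, h2⟩; simp at h2; exact ⟨h1, by omega⟩
  · rintro ⟨h1, h2⟩; refine ⟨h1, by simp; omega⟩

lemma mem_menuComb (orders : List String) (r : Nat) (c : List Char) :
    c ∈ PySem.List.combinations (pvChars (PySem.Str.join "" orders)) r
      ↔ (c.Pairwise (· < ·) ∧ c.length = r ∧ ∀ y ∈ c, ∃ o ∈ orders, y ∈ o.toList) := by
  unfold pvChars
  rw [mem_comb_sortedSet]
  constructor
  · rintro ⟨h1, h2, h3⟩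
    exact ⟨h1, h2, fun y hy => (mem_join_chars orders y).1 (h3 y hy)⟩
  · rintro ⟨h1, h2, h3⟩
    exact ⟨h1, h2, fun y hy => (mem_join_chars orders y).2 (h3 y hy)⟩

-- membership in an order's combination list, for the exact length
lemma mem_orderComb (o : String) (c : List Char) :
    c ∈ PySem.List.combinations (pvChars o) c.length
      ↔ (c.Pairwise (· < ·) ∧ ∀ y ∈ c, y ∈ o.toList) := by
  unfold pvChars
  rw [mem_comb_sortedSet]
  tauto

lemma getD_pvCounter_eq_cnt (szs : List Int) (orders : List String) (c : List Char)
    (hn : szs.Nodup) (hnn : ∀ i ∈ szs, 0 ≤ i)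
    (hc : c.Pairwise (· < ·)) (hlen : (c.length : Int) ∈ szs) :
    (pvCounter szs orders).getD c 0 = (pvCnt orders c : Int) := by
  rw [getD_pvCounter_sum]
  have : ∀ o ∈ orders,
      (szs.map (fun i => ((PySem.List.combinations (pvChars o) i.toNat).count c : Int))).sum
        = if (decide (c ∈ PySem.List.combinations (pvChars o) c.length)) = true then (1:Int) else 0 := by
    intro o _
    rw [sum_indicator o c szs hn hnn]
    by_cases hm : c ∈ PySem.List.combinations (pvChars o) c.length <;> simp [hm, hlen]
  rw [List.map_congr_left this, PySem.List.sum_map_ite_one_zero]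
  unfold pvCnt
  congr 1
  apply List.countP_congr
  intro o _
  rw [decide_eq_true_iff, mem_orderComb, all_contains_iff]
  tauto

def pvGood (orders : List String) (dic : PySem.Dict (List Char) Int) : Prop :=
  dic.keys.Nodup ∧ ∀ p ∈ dic.keys,
    dic.getD p 0 = (pvCnt orders p : Int) ∧
    p ∈ PySem.List.combinations (pvChars (PySem.Str.join "" orders)) p.length ∧
    2 ≤ pvCnt orders p

lemma good_empty (orders : List String) : pvGood orders PySem.Dict.empty := by
  constructor
  · rw [PySem.Dict.keys_empty]; exact List.nodup_nil
  · intro p hp; rw [PySem.Dict.keys_empty] at hp; cases hp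

def pvInsF (orders : List String) (r : Nat) (dic : PySem.Dict (List Char) Int) :
    PySem.Dict (List Char) Int :=
  (pvF orders r).foldl (fun d j => d.insert j ((pvCnt orders j : Int))) dic

lemma getD_pvInsF (orders : List String) (r : Nat) (dic : PySem.Dict (List Char) Int) (p : List Char) :
    (pvInsF orders r dic).getD p 0
      = if p ∈ pvF orders r then (pvCnt orders p : Int) else dic.getD p 0 := by
  unfold pvInsF
  exact getD_foldl_inserts _ _ dic p

lemma keys_pvInsF (orders : List String) (r : Nat) (dic : PySem.Dict (List Char) Int) (p : List Char) :
    p ∈ (pvInsF orders r dic).keys ↔ p ∈ dic.keys ∨ p ∈ pvF orders r := by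
  unfold pvInsF
  rw [PySem.Dict.keys_foldl_insert, PySem.Set.mem_update]

lemma good_pvInsF (orders : List String) (r : Nat) (dic : PySem.Dict (List Char) Int)
    (h : pvGood orders dic) : pvGood orders (pvInsF orders r dic) := by
  obtain ⟨hnd, hmem⟩ := h
  constructor
  · unfold pvInsF; exact PySem.Dict.nodup_keys_foldl_insert _ _ _ hnd
  · intro p hp
    rw [keys_pvInsF] at hp
    rw [getD_pvInsF]
    by_cases hpf : p ∈ pvF orders r
    · rw [if_pos hpf]
      rcases (mem_pvF orders r p).1 hpf with ⟨hcomb, hcnt⟩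
      have hlen : p.length = r := PySem.List.length_of_mem_combinations hcomb
      exact ⟨rfl, by rwa [hlen], hcnt⟩
    · rw [if_neg hpf]
      rcases hp with hp | hp
      · exact hmem p hp
      · exact absurd hp hpf

-- the keys of length r in the updated dict are exactly pvF
lemma keys_len_pvInsF (orders : List String) (r : Nat) (dic : PySem.Dict (List Char) Int)
    (h : pvGood orders dic) (p : List Char) :
    (p ∈ (pvInsF orders r dic).keys ∧ p.length = r) ↔ p ∈ pvF orders r := by
  constructor
  · rintro ⟨hp, hlen⟩
    rw [keys_pvInsF] at hp
    rcases hp with hp | hp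
    · rcases h.2 p hp with ⟨_, hcomb, hcnt⟩
      rw [mem_pvF]
      exact ⟨by rwa [hlen] at hcomb, hcnt⟩
    · exact hp
  · intro hp
    refine ⟨(keys_pvInsF orders r dic p).2 (Or.inr hp), ?_⟩
    exact PySem.List.length_of_mem_combinations ((mem_pvF orders r p).1 hp).1

lemma pairwise_of_mem_ctrKeys (szsAll : List Int) (orders : List String) (c : List Char)
    (h : c ∈ (pvCounter (PySem.Set.ofList szsAll) orders).keys) : c.Pairwise (· < ·) := by
  rcases (mem_keys_pvCounter _ orders c).1 h with ⟨o, _, i', _, hc⟩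
  have := (mem_comb_sortedSet o.toList i'.toNat c).1 (by unfold pvChars at hc; exact hc)
  exact this.1

lemma len_nonneg_mem (szsAll : List Int) (hnn : ∀ i ∈ szsAll, 0 ≤ i) :
    ∀ i ∈ PySem.Set.ofList szsAll, 0 ≤ i := by
  intro i hi
  exact hnn i ((PySem.Set.mem_ofList szsAll i).1 hi)

lemma cands_mem_iff (szsAll : List Int) (orders : List String) (i : Int)
    (hnn : ∀ j ∈ szsAll, 0 ≤ j) (hi : i ∈ szsAll) (hi0 : 0 ≤ i) (c : List Char) :
    (c ∈ (pvCounter (PySem.Set.ofList szsAll) orders).keys ∧ (c.length : Int) = i ∧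
       2 ≤ (pvCounter (PySem.Set.ofList szsAll) orders).getD c 0)
      ↔ c ∈ pvF orders i.toNat := by
  constructor
  · rintro ⟨hk, hlen, hge⟩
    have hpw : c.Pairwise (· < ·) := pairwise_of_mem_ctrKeys szsAll orders c hk
    have hlenmem : (c.length : Int) ∈ PySem.Set.ofList szsAll := by
      rw [PySem.Set.mem_ofList, hlen]; exact hi
    rw [getD_pvCounter_eq_cnt _ orders c (PySem.Set.nodup_ofList _)
        (len_nonneg_mem szsAll hnn) hpw hlenmem] at hge
    have hcnt : 2 ≤ pvCnt orders c := by exact_mod_cast hge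
    rw [mem_pvF]
    refine ⟨?_, hcnt⟩
    -- c is in ≥ 2 orders, so in ≥ 1: its chars all come from the joined menu
    have hpos : 0 < orders.countP (fun k => c.all (fun x => k.toList.contains x)) := by
      unfold pvCnt at hcnt; omega
    rcases List.countP_pos_iff.mp hpos with ⟨o, ho, hpo⟩
    rw [all_contains_iff] at hpo
    rw [mem_menuComb]
    exact ⟨hpw, by omega, fun y hy => ⟨o, ho, hpo y hy⟩⟩
  · intro hc
    rcases (mem_pvF orders i.toNat c).1 hc with ⟨hcomb, hcnt⟩
    rcases (mem_menuComb orders i.toNat c).1 hcomb with ⟨hpw, hlen, _⟩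
    have hleni : (c.length : Int) = i := by omega
    have hlenmem : (c.length : Int) ∈ PySem.Set.ofList szsAll := by
      rw [PySem.Set.mem_ofList, hleni]; exact hi
    refine ⟨?_, hleni, ?_⟩
    · rw [mem_keys_pvCounter]
      have hpos : 0 < orders.countP (fun k => c.all (fun x => k.toList.contains x)) := by
        unfold pvCnt at hcnt; omega
      rcases List.countP_pos_iff.mp hpos with ⟨o, ho, hpo⟩
      rw [all_contains_iff] at hpo
      refine ⟨o, ho, i, ?_, ?_⟩
      · rw [PySem.Set.mem_ofList]; exact hi
      · have : i.toNat = c.length := by omega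
        rw [this]
        exact (mem_orderComb o c).2 ⟨hpw, hpo⟩
    · rw [getD_pvCounter_eq_cnt _ orders c (PySem.Set.nodup_ofList _)
        (len_nonneg_mem szsAll hnn) hpw hlenmem]
      exact_mod_cast hcnt

def pvStepB (ctr : PySem.Dict (List Char) Int) (i : Int) : List String :=
  let cands := ctr.keys.filter (fun c => (c.length : Int) == i && decide (2 ≤ ctr.getD c 0))
  if cands ≠ [] then
    (cands.filter (fun c => ctr.getD c 0 ==
      (PySem.List.max? (cands.map (fun c => ctr.getD c 0)) (fun x => x)).getD 0)).map
        (fun c => String.ofList c)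
  else []

lemma mem_cands (ctr : PySem.Dict (List Char) Int) (i : Int) (c : List Char) :
    c ∈ ctr.keys.filter (fun c => (c.length : Int) == i && decide (2 ≤ ctr.getD c 0))
      ↔ (c ∈ ctr.keys ∧ (c.length : Int) = i ∧ 2 ≤ ctr.getD c 0) := by
  rw [List.mem_filter]
  simp

lemma cands_perm (szsAll : List Int) (orders : List String) (i : Int)
    (hnn : ∀ j ∈ szsAll, 0 ≤ j) (hi : i ∈ szsAll) (hi0 : 0 ≤ i)
    (hndk : (pvCounter (PySem.Set.ofList szsAll) orders).keys.Nodup) :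
    ((pvCounter (PySem.Set.ofList szsAll) orders).keys.filter
        (fun c => (c.length : Int) == i &&
          decide (2 ≤ (pvCounter (PySem.Set.ofList szsAll) orders).getD c 0))).Perm
      (pvF orders i.toNat) := by
  apply (List.perm_ext_iff_of_nodup (hndk.filter _) (nodup_pvF orders i.toNat)).2
  intro c
  rw [mem_cands]
  exact cands_mem_iff szsAll orders i hnn hi hi0 c

lemma cands_getD (szsAll : List Int) (orders : List String) (i : Int)
    (hnn : ∀ j ∈ szsAll, 0 ≤ j) (hi : i ∈ szsAll) (c : List Char)
    (hc : c ∈ (pvCounter (PySem.Set.ofList szsAll) orders).keys.filter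
        (fun c => (c.length : Int) == i &&
          decide (2 ≤ (pvCounter (PySem.Set.ofList szsAll) orders).getD c 0))) :
    (pvCounter (PySem.Set.ofList szsAll) orders).getD c 0 = (pvCnt orders c : Int) := by
  rcases (mem_cands _ i c).1 hc with ⟨hk, hlen, _⟩
  exact getD_pvCounter_eq_cnt _ orders c (PySem.Set.nodup_ofList _)
    (len_nonneg_mem szsAll hnn) (pairwise_of_mem_ctrKeys szsAll orders c hk)
    (by rw [PySem.Set.mem_ofList, hlen]; exact hi)

-- the list appended by A in one loop step, compared with B's per-size list
lemma stepTail_perm (szsAll : List Int) (orders : List String) (i : Int)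
    (hnn : ∀ j ∈ szsAll, 0 ≤ j) (hi : i ∈ szsAll) (hi0 : 0 ≤ i)
    (dic : PySem.Dict (List Char) Int) (hg : pvGood orders dic)
    (q' : Option Int)
    (hq : pvF orders i.toNat ≠ [] →
      q' = some ((PySem.List.max? ((pvF orders i.toNat).map (fun j => (pvCnt orders j : Int)))
        (fun x => x)).getD 0)) :
    (((pvInsF orders i.toNat dic).keys.filter
        (fun p => decide ((p.length : Int) = i) &&
          (some ((pvInsF orders i.toNat dic).getD p 0) == q'))).map
      (fun c => String.ofList c)).Perm
      (pvStepB (pvCounter (PySem.Set.ofList szsAll) orders) i) := by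
  have hndk := nodup_keys_pvCounter (PySem.Set.ofList szsAll) orders
  have hcperm := cands_perm szsAll orders i hnn hi hi0 hndk
  set ctr := pvCounter (PySem.Set.ofList szsAll) orders with hctr
  set cands := ctr.keys.filter
      (fun c => (c.length : Int) == i && decide (2 ≤ ctr.getD c 0)) with hcands
  by_cases hF : pvF orders i.toNat = []
  · -- no qualifying combination of this size: both sides contribute nothing
    have hcnil : cands = [] := by rw [hF] at hcperm; exact hcperm.eq_nil
    have hfilnil : (pvInsF orders i.toNat dic).keys.filter
        (fun p => decide ((p.length : Int) = i) &&
          (some ((pvInsF orders i.toNat dic).getD p 0) == q')) = [] := by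
      rw [List.filter_eq_nil_iff]
      intro p hp
      simp only [Bool.and_eq_true, decide_eq_true_iff]
      rintro ⟨hlen, _⟩
      have hlnat : p.length = i.toNat := by omega
      have := (keys_len_pvInsF orders i.toNat dic hg p).1 ⟨hp, hlnat⟩
      rw [hF] at this
      cases this
    rw [hfilnil]
    unfold pvStepB
    rw [← hcands, hcnil]
    simp
  · -- the qualifying set is nonempty
    have hq' := hq hF
    set m : Int := (PySem.List.max? ((pvF orders i.toNat).map (fun j => (pvCnt orders j : Int)))
        (fun x => x)).getD 0 with hm
    have hgood' := good_pvInsF orders i.toNat dic hg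
    -- A's filtered key list ~ pvF filtered at the max
    have hAeq : (pvInsF orders i.toNat dic).keys.filter
        (fun p => decide ((p.length : Int) = i) &&
          (some ((pvInsF orders i.toNat dic).getD p 0) == q'))
        = (pvInsF orders i.toNat dic).keys.filter
        (fun p => decide ((p.length : Int) = i) && ((pvCnt orders p : Int) == m)) := by
      apply List.filter_congr
      intro p hp
      rw [hq']
      have := (hgood'.2 p hp).1
      rw [this]
      simp
    have hAperm : ((pvInsF orders i.toNat dic).keys.filter
        (fun p => decide ((p.length : Int) = i) && ((pvCnt orders p : Int) == m))).Perm
        ((pvF orders i.toNat).filter (fun p => (pvCnt orders p : Int) == m)) := by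
      apply (List.perm_ext_iff_of_nodup (hgood'.1.filter _) ((nodup_pvF orders i.toNat).filter _)).2
      intro p
      rw [List.mem_filter, List.mem_filter]
      simp only [Bool.and_eq_true, decide_eq_true_iff]
      constructor
      · rintro ⟨hp, hlen, hcnt⟩
        have hlnat : p.length = i.toNat := by omega
        exact ⟨(keys_len_pvInsF orders i.toNat dic hg p).1 ⟨hp, hlnat⟩, hcnt⟩
      · rintro ⟨hp, hcnt⟩
        have h2 := (keys_len_pvInsF orders i.toNat dic hg p).2 hp
        refine ⟨h2.1, by omega, hcnt⟩
    -- B's side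
    have hcne : cands ≠ [] := by
      intro h
      exact hF (h ▸ hcperm).symm.eq_nil
    have hmapeq : cands.map (fun c => ctr.getD c 0) = cands.map (fun c => (pvCnt orders c : Int)) := by
      apply List.map_congr_left
      intro c hc
      exact cands_getD szsAll orders i hnn hi c hc
    have hbest : (PySem.List.max? (cands.map (fun c => ctr.getD c 0)) (fun x => x)).getD 0 = m := by
      rw [hmapeq, hm]
      exact maxD_getD_perm _ _ (hcperm.map _)
    have hBfil : cands.filter (fun c => ctr.getD c 0 ==
          (PySem.List.max? (cands.map (fun c => ctr.getD c 0)) (fun x => x)).getD 0)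
        = cands.filter (fun c => (pvCnt orders c : Int) == m) := by
      apply List.filter_congr
      intro c hc
      rw [hbest, cands_getD szsAll orders i hnn hi c hc]
    have hBperm : (cands.filter (fun c => (pvCnt orders c : Int) == m)).Perm
        ((pvF orders i.toNat).filter (fun c => (pvCnt orders c : Int) == m)) :=
      hcperm.filter _
    unfold pvStepB
    rw [← hcands]
    rw [if_pos hcne]
    rw [hBfil]
    exact ((hAeq ▸ (hAperm.trans hBperm.symm)).map _)

def pvMaxlen (orders : List String) : Int :=
  PySem.List.maxD (orders.map (fun o => (PySem.Str.len o : Int))) (fun x => x) 0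

lemma headLen_eq_maxlen (orders : List String) (h : orders ≠ []) :
    (PySem.Str.len ((PySem.List.sorted orders (fun x => (PySem.Str.len x : Int)) true).headD "") : Int)
      = pvMaxlen orders := by
  cases hs : PySem.List.sorted orders (fun x => (PySem.Str.len x : Int)) true with
  | nil => exact absurd ((PySem.List.sorted_eq_nil_iff _ _ _).1 hs) h
  | cons m t =>
    have hmax := PySem.List.key_head_sorted_rev_ge orders (fun x => (PySem.Str.len x : Int)) hs
    have hmem : m ∈ orders := (PySem.List.sorted_perm orders _ true).subset (hs ▸ List.mem_cons_self)
    unfold pvMaxlen PySem.List.maxD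
    cases hmx : PySem.List.max? (orders.map (fun o => (PySem.Str.len o : Int))) (fun x => x) with
    | none =>
      rw [PySem.List.max?_eq_none_iff] at hmx
      exact absurd (List.map_eq_nil_iff.1 hmx) h
    | some v =>
      have hv := PySem.List.max?_isMax hmx
      have hvm : v ∈ orders.map (fun o => (PySem.Str.len o : Int)) := PySem.List.max?_mem hmx
      rcases List.mem_map.1 hvm with ⟨y, hy, rfl⟩
      have h1 : (PySem.Str.len y : Int) ≤ (PySem.Str.len m : Int) := hmax y hy
      have h2 : (PySem.Str.len m : Int) ≤ (PySem.Str.len y : Int) :=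
        hv _ (List.mem_map.2 ⟨m, hmem, rfl⟩)
      simp only [List.headD_cons, Option.getD_some]
      omega

lemma solB_sizes_eq_takeWhile (m : Int) : ∀ (cs : List Int),
    solB_sizes m cs = cs.takeWhile (fun i => decide (i ≤ m)) := by
  intro cs
  induction cs with
  | nil => rfl
  | cons i rest ih =>
    by_cases hi : i > m
    · rw [solB_sizes, if_pos hi, List.takeWhile_cons]
      simp [show ¬ (i ≤ m) by omega]
    · rw [solB_sizes, if_neg hi, List.takeWhile_cons]
      simp only [show (i ≤ m) by omega, decide_true, if_true]
      rw [ih]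

lemma foldlmax_eq (orders : List String) (h : orders ≠ []) :
    (orders.map (fun o => (PySem.Str.len o : Int))).foldl max 0 = pvMaxlen orders := by
  cases orders with
  | nil => exact absurd rfl h
  | cons x t =>
    unfold pvMaxlen
    rw [show ((x :: t).map (fun o => (PySem.Str.len o : Int))) =
      ((PySem.Str.len x : Int) :: t.map (fun o => (PySem.Str.len o : Int))) from rfl]
    rw [PySem.List.maxD, PySem.List.max?_id_cons]
    simp only [List.foldl_cons, Option.getD_some]
    have h0 : max (0:Int) (PySem.Str.len x : Int) = (PySem.Str.len x : Int) := by
      have : (0 : Int) ≤ (PySem.Str.len x : Int) := Int.natCast_nonneg _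
      omega
    rw [h0]

lemma solA_cnt_eq (orders : List String) :
    solA_cnt (PySem.List.sorted orders (fun x => (PySem.Str.len x : Int)) true)
      = fun j => (pvCnt orders j : Int) := by
  funext j
  unfold solA_cnt
  rw [solA_cnt_fold]
  unfold pvCnt
  rw [(PySem.List.sorted_perm orders _ true).countP_eq]

lemma loopA_perm (orders : List String) (szsAll : List Int)
    (hnnAll : ∀ j ∈ szsAll, 0 ≤ j)
    (hml : (PySem.Str.len ((PySem.List.sorted orders (fun x => (PySem.Str.len x : Int)) true).headD "") : Int)
      = pvMaxlen orders) :
    ∀ (cs : List Int) (dic : PySem.Dict (List Char) Int) (q? : Option Int) (answer : List String),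
    pvGood orders dic →
    (∀ i ∈ solB_sizes (pvMaxlen orders) cs, i ∈ szsAll ∧ 0 ≤ i) →
    (solA_loop (pvChars (PySem.Str.join "" orders))
        (PySem.List.sorted orders (fun x => (PySem.Str.len x : Int)) true) cs dic [] q? answer).Perm
      (answer ++ (solB_sizes (pvMaxlen orders) cs).flatMap
        (pvStepB (pvCounter (PySem.Set.ofList szsAll) orders))) := by
  intro cs
  induction cs with
  | nil =>
    intro dic q? answer hg hsub
    simp [solA_loop, solB_sizes]
  | cons i rest ih =>
    intro dic q? answer hg hsub
    rw [solA_loop]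
    rw [hml]
    by_cases hbig : i > pvMaxlen orders
    · rw [if_pos hbig, solB_sizes, if_pos hbig]
      simp
    · rw [if_neg hbig]
      have hsizes : solB_sizes (pvMaxlen orders) (i :: rest) = i :: solB_sizes (pvMaxlen orders) rest := by
        rw [solB_sizes, if_neg hbig]
      rw [hsizes] at hsub ⊢
      have hiAll : i ∈ szsAll := (hsub i (by simp)).1
      have hi0 : 0 ≤ i := (hsub i (by simp)).2
      have hsub' : ∀ j ∈ solB_sizes (pvMaxlen orders) rest, j ∈ szsAll ∧ 0 ≤ j :=
        fun j hj => hsub j (by simp [hj])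
      simp only [solA_cnt_eq orders]
      rw [stepA_pairfold' (fun j => (pvCnt orders j : Int))]
      rw [show ((PySem.Set.ofList (PySem.List.combinations (pvChars (PySem.Str.join "" orders)) i.toNat)).filter
            (fun j => decide (1 < (pvCnt orders j : Int)))) = pvF orders i.toNat from rfl]
      rw [show ((pvF orders i.toNat).foldl
            (fun d j => d.insert j ((pvCnt orders j : Int))) dic) = pvInsF orders i.toNat dic from rfl]
      simp only [List.nil_append]
      set F := pvF orders i.toNat with hFdef
      set dic' := pvInsF orders i.toNat dic with hdic'
      have hgood' := good_pvInsF orders i.toNat dic hg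
      by_cases hF : F = []
      · -- b = [] branch
        rw [hF]
        simp only [List.map_nil, ne_eq, not_true_eq_false, if_false]
        have hfn : (fun (ans : List String) p =>
              if (p.length : Int) = i then
                if (some (dic'.getD p 0) == q?) = true then ans ++ [String.ofList p] else ans
              else ans)
            = (fun (ans : List String) p =>
              if (decide ((p.length : Int) = i) && (some (dic'.getD p 0) == q?)) = true
              then ans ++ [String.ofList p] else ans) := by
          funext ans p
          by_cases h1 : (p.length : Int) = i <;> by_cases h2 : (some (dic'.getD p 0) == q?) = true <;>
            simp [h1, h2]
        rw [hfn, PySem.List.foldl_append_if]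
        have htail := stepTail_perm szsAll orders i hnnAll hiAll hi0 dic hg q? (fun h => absurd hF h)
        rw [← hdic'] at htail
        rw [List.flatMap_cons]
        refine (ih dic' q? _ hgood' hsub').trans ?_
        rw [List.append_assoc]
        exact List.Perm.append_left answer (htail.append_right _)
      · have hb : (F.map (fun j => (pvCnt orders j : Int))) ≠ [] := by simpa using hF
        simp only [ne_eq, hb, not_false_eq_true, if_true]
        set m : Int := (PySem.List.max? (F.map (fun j => (pvCnt orders j : Int))) (fun x => x)).getD 0 with hmdef
        have hfn : (fun (ans : List String) p =>
              if (p.length : Int) = i then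
                if (some (dic'.getD p 0) == some m) = true then ans ++ [String.ofList p] else ans
              else ans)
            = (fun (ans : List String) p =>
              if (decide ((p.length : Int) = i) && (some (dic'.getD p 0) == some m)) = true
              then ans ++ [String.ofList p] else ans) := by
          funext ans p
          by_cases h1 : (p.length : Int) = i <;> by_cases h2 : (some (dic'.getD p 0) == some m) = true <;>
            simp [h1, h2]
        rw [hfn, PySem.List.foldl_append_if]
        have htail := stepTail_perm szsAll orders i hnnAll hiAll hi0 dic hg (some m) (fun _ => rfl)
        rw [← hdic'] at htail
        rw [List.flatMap_cons]
        refine (ih dic' (some m) _ hgood' hsub').trans ?_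
        rw [List.append_assoc]
        exact List.Perm.append_left answer (htail.append_right _)

lemma solution_alt_unfold (orders : List String) (course : List Int) :
    solution_alt orders course
    = PySem.List.sorted
        ((solB_sizes (pvMaxlen orders) course).flatMap
          (pvStepB (pvCounter (PySem.Set.ofList (solB_sizes (pvMaxlen orders) course)) orders)))
        (fun x => x) false := by
  simp only [solution_alt]
  rw [show PySem.List.maxD (orders.map (fun o => (PySem.Str.len o : Int))) (fun x => x) 0
      = pvMaxlen orders from rfl]
  rw [show (orders.foldl (fun d o =>
        (PySem.Set.ofList (solB_sizes (pvMaxlen orders) course)).foldl (fun d i =>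
          (PySem.List.combinations (PySem.List.sorted (PySem.Set.ofList o.toList) (fun x => x) false) i.toNat).foldl
            (fun d c => d.modify c 0 (· + 1)) d) d)
      (PySem.Dict.empty : PySem.Dict (List Char) Int))
    = pvCounter (PySem.Set.ofList (solB_sizes (pvMaxlen orders) course)) orders from rfl]
  set ctr := pvCounter (PySem.Set.ofList (solB_sizes (pvMaxlen orders) course)) orders with hctr
  have hfn : (fun (ans : List String) (i : Int) =>
        if (ctr.keys.filter (fun c => (c.length : Int) == i && decide (2 ≤ ctr.getD c 0))) ≠ [] then
          ans ++ ((ctr.keys.filter (fun c => (c.length : Int) == i && decide (2 ≤ ctr.getD c 0))).filter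
              (fun c => ctr.getD c 0 ==
                (PySem.List.max? ((ctr.keys.filter (fun c => (c.length : Int) == i && decide (2 ≤ ctr.getD c 0))).map
                  (fun c => ctr.getD c 0)) (fun x => x)).getD 0)).map (fun c => String.ofList c)
        else ans)
      = (fun ans i => ans ++ pvStepB ctr i) := by
    funext ans i
    unfold pvStepB
    by_cases hc : (ctr.keys.filter (fun c => (c.length : Int) == i && decide (2 ≤ ctr.getD c 0))) ≠ [] <;>
      simp [hc]
  rw [hfn, PySem.List.foldl_append_eq_flatMap]
  simp

theorem main_eq (orders : List String) (course : List Int) (hpre : Pre_solution orders course) :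
    solution orders course = solution_alt orders course := by
  by_cases horders : orders = []
  · have hc : course = [] := hpre.1 horders
    subst horders; subst hc
    rfl
  · rw [solution_alt_unfold]
    simp only [solution]
    rw [show PySem.List.sorted (PySem.Set.ofList (PySem.Str.join "" orders).toList) (fun x => x) false
        = pvChars (PySem.Str.join "" orders) from rfl]
    have hml := headLen_eq_maxlen orders horders
    have hp2 := hpre.2
    rw [foldlmax_eq orders horders] at hp2
    have hnnAll : ∀ i ∈ solB_sizes (pvMaxlen orders) course, 0 ≤ i := by
      intro i hi
      rw [solB_sizes_eq_takeWhile] at hi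
      exact hp2 i hi
    have hperm := loopA_perm orders (solB_sizes (pvMaxlen orders) course) hnnAll hml course
      PySem.Dict.empty none [] (good_empty orders) (fun i hi => ⟨hi, hnnAll i hi⟩)
    rw [List.nil_append] at hperm
    exact (PySem.List.sorted_id_eq_sorted_id_iff_perm _ _).2 hperm

-- ===== VERDICT (by name: the statement is the Claim_ definition above) =====
theorem solution_spec : Claim_equal_solution := by
  intro orders course hdom hpre
  unfold Spec_solution
  exact main_eq orders course hpre
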